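-- pv_equiv track=rewrite | github.com/workfloworchestrator/orchestrator-core | orchestrator/cli/generator/generator/product_registry.py | insert_into_product_registry
-- ===== SOURCE A (Python) =====
-- from typing import Callable, Generator
--
-- def insert_into_product_registry(content: list[str], product_declaration: str) -> list[str]:
--     # Note: we may consider using a real Python parser here someday, but for now this is ok and formatting
--     # gets done by isort and black.
--     def produce() -> Generator:
--         not_inserted_yet = True
--         for line in content:
--             # first closing bracket marks the end of the registry definition
--             if "}" in line and not_inserted_yet:
--                 yield product_declaration
--                 not_inserted_yet = False
--             yield line
--
--     return [*produce()]
-- ===== SOURCE B (Python) =====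
-- def insert_into_product_registry(content: list[str], product_declaration: str) -> list[str]:
--     for i, line in enumerate(content):
--         if "}" in line:
--             return content[:i] + [product_declaration] + content[i:]
--     return list(content)
-- ===== Notes on version B (the rewrite author's own statement) =====
-- stated objective: simpler
-- what changed: Replaced A's stateful generator (inserted-flag plus interleaved yields) with a direct scan for the index of the first line containing '}' followed by slice-concatenation.
import Mathlib
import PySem

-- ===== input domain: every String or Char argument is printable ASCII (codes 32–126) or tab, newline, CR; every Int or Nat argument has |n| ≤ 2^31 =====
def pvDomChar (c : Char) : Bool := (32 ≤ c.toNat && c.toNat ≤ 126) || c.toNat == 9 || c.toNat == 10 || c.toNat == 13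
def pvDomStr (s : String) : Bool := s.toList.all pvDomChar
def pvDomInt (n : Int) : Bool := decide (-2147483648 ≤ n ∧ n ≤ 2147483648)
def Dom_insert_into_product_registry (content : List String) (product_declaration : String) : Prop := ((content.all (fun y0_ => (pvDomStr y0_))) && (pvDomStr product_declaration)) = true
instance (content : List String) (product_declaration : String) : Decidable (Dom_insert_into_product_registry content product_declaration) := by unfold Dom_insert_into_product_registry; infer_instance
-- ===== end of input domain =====

-- B replaces A's stateful generator (flag + interleaved yields) by finding the splice index
-- first and returning take/insert/drop; objective: simpler. Return-value equivalence only.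

-- ===== PORT A =====
-- the generator 'produce': walks content carrying the not_inserted_yet flag
def pvProduce (product_declaration : String) : List String → Bool → List String
  | [], _ => []
  | line :: rest, not_inserted_yet =>
    if PySem.Str.isIn "}" line && not_inserted_yet then
      product_declaration :: line :: pvProduce product_declaration rest false
    else
      line :: pvProduce product_declaration rest not_inserted_yet

def insert_into_product_registry (content : List String) (product_declaration : String) : List String :=
  pvProduce product_declaration content true

-- ===== PORT B =====
-- scan for the first index whose line contains '}'; splice there, else copy
def pvFindBrace : List String → Option Nat
  | [] => none
  | line :: rest =>
    if PySem.Str.isIn "}" line then some 0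
    else (pvFindBrace rest).map (· + 1)

def insert_into_product_registry_alt (content : List String) (product_declaration : String) : List String :=
  match pvFindBrace content with
  | some i => content.take i ++ [product_declaration] ++ content.drop i
  | none => content

-- ===== PRECONDITION & SPEC =====
def Spec_insert_into_product_registry (content : List String) (product_declaration : String) (out : List String) : Prop := out = insert_into_product_registry_alt content product_declaration
instance (content : List String) (product_declaration : String) (out : List String) : Decidable (Spec_insert_into_product_registry content product_declaration out) := by unfold Spec_insert_into_product_registry; infer_instance

-- ===== CLAIM (what is proved, stated in full; the proofs are below) =====
def Claim_equal_insert_into_product_registry : Prop := ∀ (content : List String) (product_declaration : String), Dom_insert_into_product_registry content product_declaration → Spec_insert_into_product_registry content product_declaration (insert_into_product_registry content product_declaration)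

-- ===== LEMMAS AND PROOFS =====
-- with the flag false, produce is the identity
theorem pvProduce_false (pd : String) (xs : List String) : pvProduce pd xs false = xs := by
  induction xs with
  | nil => rfl
  | cons l ls ih => simp [pvProduce, ih]

theorem pvProduce_eq_alt (pd : String) (xs : List String) :
    pvProduce pd xs true = insert_into_product_registry_alt xs pd := by
  induction xs with
  | nil => rfl
  | cons l ls ih =>
    simp only [pvProduce, insert_into_product_registry_alt, pvFindBrace, Bool.and_true, PySem.Str.isIn] at ih ⊢
    by_cases h : PySem.Chars.isIn "}".toList l.toList = true
    · rw [if_pos h, if_pos h]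
      simp [pvProduce_false]
    · rw [if_neg h, if_neg h]
      cases hf : pvFindBrace ls with
      | none => simp [hf] at ih; simp [ih]
      | some i => simp [hf] at ih; simp [ih]

-- ===== VERDICT (by name: the statement is the Claim_ definition above) =====
theorem insert_into_product_registry_spec : Claim_equal_insert_into_product_registry := by
  intro content pd _
  exact pvProduce_eq_alt pd content
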